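-- pv_equiv track=rewrite | github.com/ImoutoHeaven/scripts-examples | rclone_batch_transfer/rclone-group.py | find_best_combination
-- ===== SOURCE A (Python) =====
-- from typing import List, Dict, Tuple, Set, Optional
--
-- def find_best_combination(items: List[Tuple[str, int]], target_size: int) -> List[Tuple[str, int]]:
--     """找到总和最接近但不超过目标大小的项目组合"""
--     if not items:
--         return []
--
--     # 如果只有一个项目，且它小于目标大小，则返回它
--     if len(items) == 1 and items[0][1] <= target_size:
--         return [items[0]]
--
--     # 尝试从剩余项目中找到最佳组合
--     best_combo = []
--     best_size = 0
--
--     # 尝试将第一个项目与其他项目组合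
--     first_item = items[0]
--     if first_item[1] <= target_size:
--         best_combo = [first_item]
--         best_size = first_item[1]
--
--     # 尝试其他组合
--     for i in range(1, len(items) + 1):
--         for j in range(i + 1, len(items) + 1):
--             combo = items[i-1:j]
--             combo_size = sum(item[1] for item in combo)
--
--             if combo_size <= target_size and combo_size > best_size:
--                 best_combo = combo
--                 best_size = combo_size
--
--     return best_combo
-- ===== SOURCE B (Python) =====
-- def find_best_combination(items, target_size):
--     """Same result as A, but with a running sum per start index: O(n^2) instead of
--     A's O(n^3) re-summation of every slice."""
--     if not items:
--         return []
--     best_combo, best_size = [], 0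
--     if items[0][1] <= target_size:
--         best_combo, best_size = [items[0]], items[0][1]
--     n = len(items)
--     for s in range(n - 1):
--         acc = items[s][1]
--         for e in range(s + 1, n):
--             acc += items[e][1]
--             if acc <= target_size and acc > best_size:
--                 best_combo, best_size = items[s:e + 1], acc
--     return best_combo
-- ===== Notes on version B (the rewrite author's own statement) =====
-- stated objective: faster
-- what changed: B keeps a running sum per start index while scanning end indices, so the inner re-summation of every slice disappears: O(n^2) instead of A's O(n^3); A's redundant len==1 special case and its empty extra outer iteration are also gone.
import Mathlib
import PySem

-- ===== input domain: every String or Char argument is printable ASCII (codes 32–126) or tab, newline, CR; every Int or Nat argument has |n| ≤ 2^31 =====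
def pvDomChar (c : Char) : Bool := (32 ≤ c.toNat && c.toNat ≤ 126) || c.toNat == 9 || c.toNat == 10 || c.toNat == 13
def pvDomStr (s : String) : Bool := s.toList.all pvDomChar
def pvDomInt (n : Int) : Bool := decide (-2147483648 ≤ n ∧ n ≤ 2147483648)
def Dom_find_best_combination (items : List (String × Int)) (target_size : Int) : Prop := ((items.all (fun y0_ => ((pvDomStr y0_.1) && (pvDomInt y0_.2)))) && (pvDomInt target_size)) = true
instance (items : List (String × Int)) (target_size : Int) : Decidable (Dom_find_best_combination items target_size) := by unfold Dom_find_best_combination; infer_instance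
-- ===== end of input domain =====

-- B replaces A's triple loop (every slice re-summed) by a per-start running sum; the
-- return values are proved identical on all inputs.

-- ===== PORT A =====
-- sum(item[1] for item in combo)
def pvSum (l : List (String × Int)) : Int := l.foldl (fun a p => a + p.2) 0

-- body of A's inner loop (i, j are A's loop variables; state = (best_combo, best_size))
def pvStepA (items : List (String × Int)) (target_size i : Int)
    (st : List (String × Int) × Int) (j : Int) : List (String × Int) × Int :=
  let combo := PySem.List.slice items (some (i - 1)) (some j)
  let combo_size := pvSum combo
  if combo_size ≤ target_size ∧ combo_size > st.2 then (combo, combo_size) else st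

def find_best_combination (items : List (String × Int)) (target_size : Int) : List (String × Int) :=
  match items with
  | [] => []
  | first :: _ =>
    if items.length = 1 ∧ first.2 ≤ target_size then [first]
    else
      let init : List (String × Int) × Int :=
        if first.2 ≤ target_size then ([first], first.2) else ([], 0)
      ((PySem.List.pyRange 1 ((items.length : Int) + 1) 1).foldl
        (fun st i =>
          (PySem.List.pyRange (i + 1) ((items.length : Int) + 1) 1).foldl
            (pvStepA items target_size i) st) init).1

-- ===== PORT B =====
-- body of B's inner loop (s, e are B's loop variables; state = ((best_combo, best_size), acc))
def pvStepB (items : List (String × Int)) (target_size s : Int)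
    (p : (List (String × Int) × Int) × Int) (e : Int) : (List (String × Int) × Int) × Int :=
  let acc := p.2 + (PySem.List.pyGetD items e ("", 0)).2
  if acc ≤ target_size ∧ acc > p.1.2 then
    ((PySem.List.slice items (some s) (some (e + 1)), acc), acc)
  else (p.1, acc)

def find_best_combination_alt (items : List (String × Int)) (target_size : Int) : List (String × Int) :=
  match items with
  | [] => []
  | first :: _ =>
    let init : List (String × Int) × Int :=
      if first.2 ≤ target_size then ([first], first.2) else ([], 0)
    ((PySem.List.pyRange 0 ((items.length : Int) - 1) 1).foldl
      (fun st s =>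
        ((PySem.List.pyRange (s + 1) (items.length : Int) 1).foldl
          (pvStepB items target_size s)
          (st, (PySem.List.pyGetD items s ("", 0)).2)).1) init).1

-- ===== PRECONDITION & SPEC =====
def Spec_find_best_combination (items : List (String × Int)) (target_size : Int) (out : List (String × Int)) : Prop := out = find_best_combination_alt items target_size
instance (items : List (String × Int)) (target_size : Int) (out : List (String × Int)) : Decidable (Spec_find_best_combination items target_size out) := by unfold Spec_find_best_combination; infer_instance

-- ===== CLAIM (what is proved, stated in full; the proofs are below) =====
def Claim_equal_find_best_combination : Prop := ∀ (items : List (String × Int)) (target_size : Int), Dom_find_best_combination items target_size → Spec_find_best_combination items target_size (find_best_combination items target_size)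

-- ===== LEMMAS AND PROOFS =====

-- items[s:m+1] = items[s:m] ++ [items[m]]  for 0 ≤ s ≤ m < length
lemma pv_slice_succ (items : List (String × Int)) (s m : Int)
    (hs : 0 ≤ s) (hsm : s ≤ m) (hm : m < (items.length : Int)) :
    PySem.List.slice items (some s) (some (m + 1)) =
      PySem.List.slice items (some s) (some m) ++ [items.get ⟨m.toNat, by omega⟩] := by
  rw [PySem.List.slice_toNat _ hs (by omega), PySem.List.slice_toNat _ hs (by omega)]
  have h1 : (m + 1).toNat - s.toNat = (m.toNat - s.toNat) + 1 := by omega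
  rw [h1, List.take_add_one, List.getElem?_drop]
  have h2 : s.toNat + (m.toNat - s.toNat) = m.toNat := by omega
  rw [h2, List.getElem?_eq_getElem (by omega)]
  rfl

lemma pv_sum_succ (items : List (String × Int)) (s m : Int)
    (hs : 0 ≤ s) (hsm : s ≤ m) (hm : m < (items.length : Int)) :
    pvSum (PySem.List.slice items (some s) (some (m + 1))) =
      pvSum (PySem.List.slice items (some s) (some m)) + (items.get ⟨m.toNat, by omega⟩).2 := by
  rw [pv_slice_succ items s m hs hsm hm]
  simp [pvSum, List.foldl_append]

-- inner-loop equivalence: B's running sum equals A's re-summed slice, step by step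
lemma pv_inner (items : List (String × Int)) (t s : Int) (hs : 0 ≤ s) :
    ∀ (k : Nat) (m : Int), ((items.length : Int) - m).toNat = k → s < m →
      ∀ (b : List (String × Int) × Int),
      ((PySem.List.pyRange m (items.length : Int) 1).foldl (pvStepB items t s)
        (b, pvSum (PySem.List.slice items (some s) (some m)))).1 =
      (PySem.List.pyRange (m + 1) ((items.length : Int) + 1) 1).foldl
        (pvStepA items t (s + 1)) b := by
  intro k
  induction k with
  | zero =>
    intro m hk hsm b
    have hnm : (items.length : Int) ≤ m := by omega
    have hnm1 : (items.length : Int) + 1 ≤ m + 1 := by omega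
    rw [PySem.List.pyRange_one_eq_nil hnm, PySem.List.pyRange_one_eq_nil hnm1]
    rfl
  | succ k ih =>
    intro m hk hsm b
    have hmn : m < (items.length : Int) := by omega
    have hmn1 : m + 1 < (items.length : Int) + 1 := by omega
    rw [PySem.List.pyRange_one_cons hmn, PySem.List.pyRange_one_cons hmn1]
    simp only [List.foldl_cons]
    have hget : PySem.List.pyGetD items m ("", 0) = items.get ⟨m.toNat, by omega⟩ := by
      rw [PySem.List.pyGetD_eq_getElem items ("", 0) (by omega) hmn]
      rfl
    have hsum := pv_sum_succ items s m hs (by omega) hmn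
    have hstep : pvStepB items t s (b, pvSum (PySem.List.slice items (some s) (some m))) m =
        (pvStepA items t (s + 1) b (m + 1),
         pvSum (PySem.List.slice items (some s) (some (m + 1)))) := by
      have harith : s + 1 - 1 = s := by omega
      simp only [pvStepB, pvStepA, hget, hsum, harith]
      split_ifs <;> rfl
    rw [hstep]
    exact ih (m + 1) (by omega) (by omega) _

lemma pv_sum_single (items : List (String × Int)) (s : Int) (hs : 0 ≤ s)
    (hsn : s < (items.length : Int)) :
    pvSum (PySem.List.slice items (some s) (some (s + 1))) =
      (PySem.List.pyGetD items s ("", 0)).2 := by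
  rw [pv_sum_succ items s s hs le_rfl hsn,
      PySem.List.pyGetD_eq_getElem items ("", 0) hs hsn]
  have h0 : PySem.List.slice items (some s) (some s) = [] := by
    rw [PySem.List.slice_toNat _ hs hs]
    simp
  rw [h0]
  simp [pvSum]

-- outer-loop equivalence (A's extra iteration i = n has an empty inner range)
lemma pv_outer (items : List (String × Int)) (t : Int) :
    ∀ (k : Nat) (s : Int), (((items.length : Int) - 1) - s).toNat = k → 0 ≤ s →
      s ≤ (items.length : Int) - 1 →
      ∀ (b : List (String × Int) × Int),
      ((PySem.List.pyRange s ((items.length : Int) - 1) 1).foldl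
        (fun st s' =>
          ((PySem.List.pyRange (s' + 1) (items.length : Int) 1).foldl
            (pvStepB items t s')
            (st, (PySem.List.pyGetD items s' ("", 0)).2)).1) b) =
      ((PySem.List.pyRange (s + 1) ((items.length : Int) + 1) 1).foldl
        (fun st i =>
          (PySem.List.pyRange (i + 1) ((items.length : Int) + 1) 1).foldl
            (pvStepA items t i) st) b) := by
  intro k
  induction k with
  | zero =>
    intro s hk hs hsn b
    have h1 : (items.length : Int) - 1 ≤ s := by omega
    have h2 : s + 1 < (items.length : Int) + 1 := by omega
    have h3 : (items.length : Int) + 1 ≤ s + 1 + 1 := by omega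
    rw [PySem.List.pyRange_one_eq_nil h1, PySem.List.pyRange_one_cons h2,
        PySem.List.pyRange_one_eq_nil h3]
    simp only [List.foldl_cons, List.foldl_nil]
    have h4 : (items.length : Int) + 1 ≤ s + 1 + 1 := by omega
    rw [PySem.List.pyRange_one_eq_nil h4]
    rfl
  | succ k ih =>
    intro s hk hs hsn b
    have hsn' : s < (items.length : Int) - 1 := by omega
    have h2 : s + 1 < (items.length : Int) + 1 := by omega
    rw [PySem.List.pyRange_one_cons hsn', PySem.List.pyRange_one_cons h2]
    simp only [List.foldl_cons]
    have hfirst :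
        ((PySem.List.pyRange (s + 1) (items.length : Int) 1).foldl
          (pvStepB items t s) (b, (PySem.List.pyGetD items s ("", 0)).2)).1 =
        (PySem.List.pyRange (s + 1 + 1) ((items.length : Int) + 1) 1).foldl
          (pvStepA items t (s + 1)) b := by
      rw [← pv_sum_single items s hs (by omega)]
      exact pv_inner items t s hs _ (s + 1) rfl (by omega) b
    rw [hfirst]
    exact ih (s + 1) (by omega) (by omega) (by omega) _

lemma pv_main (items : List (String × Int)) (t : Int) :
    find_best_combination items t = find_best_combination_alt items t := by
  match items with
  | [] => rfl
  | first :: rest =>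
    simp only [find_best_combination, find_best_combination_alt]
    by_cases hlen : (first :: rest).length = 1 ∧ first.2 ≤ t
    · rw [if_pos hlen]
      have hr : rest = [] := by
        cases rest
        · rfl
        · simp at hlen
      subst hr
      have hnil : PySem.List.pyRange 0 (((([first] : List (String × Int)).length : Int)) - 1) 1 = [] := by
        rw [PySem.List.pyRange_one_eq_nil (by simp)]
      rw [hnil]
      simp only [List.foldl_nil]
      rw [if_pos hlen.2]
    · rw [if_neg hlen]
      have := pv_outer (first :: rest) t ((((first :: rest).length : Int) - 1) - 0).toNat 0 rfl
        (le_refl 0) (by simp only [List.length_cons]; push_cast; omega)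
        (if first.2 ≤ t then ([first], first.2) else ([], 0))
      simp only [zero_add] at this
      rw [← this]

-- ===== VERDICT (by name: the statement is the Claim_ definition above) =====
theorem find_best_combination_spec : Claim_equal_find_best_combination := by
  intro items target_size _
  unfold Spec_find_best_combination
  exact pv_main items target_size
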